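-- pv_equiv track=rewrite | github.com/roshankraveendrababu/coding-files | kunal_recursion/no_subsets_with_given_diff.py | find_cnt
-- ===== SOURCE A (Python) =====
-- def find_cnt(subs1,subs2,goal):
--     cnt=0
--     for i in range(goal+1):
--         if i in subs1:
--             needed=goal-i
--             if needed in subs2:
--                 cnt+=(subs1[i]*subs2[needed])
--     return cnt
-- ===== SOURCE B (Python) =====
-- def find_cnt(subs1, subs2, goal):
--     return sum(v * subs2[goal - k] for k, v in subs1.items()
--                if 0 <= k <= goal and (goal - k) in subs2)
-- ===== Notes on version B (the rewrite author's own statement) =====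
-- stated objective: simpler
-- what changed: Instead of scanning every integer i in range(goal+1) and probing both dicts, B is a one-line sum over subs1's items, keeping keys in [0, goal] and looking up goal-k in subs2; asymptotically O(len(subs1)) instead of O(goal), though not measurably faster on the benchmark inputs.
import Mathlib
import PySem

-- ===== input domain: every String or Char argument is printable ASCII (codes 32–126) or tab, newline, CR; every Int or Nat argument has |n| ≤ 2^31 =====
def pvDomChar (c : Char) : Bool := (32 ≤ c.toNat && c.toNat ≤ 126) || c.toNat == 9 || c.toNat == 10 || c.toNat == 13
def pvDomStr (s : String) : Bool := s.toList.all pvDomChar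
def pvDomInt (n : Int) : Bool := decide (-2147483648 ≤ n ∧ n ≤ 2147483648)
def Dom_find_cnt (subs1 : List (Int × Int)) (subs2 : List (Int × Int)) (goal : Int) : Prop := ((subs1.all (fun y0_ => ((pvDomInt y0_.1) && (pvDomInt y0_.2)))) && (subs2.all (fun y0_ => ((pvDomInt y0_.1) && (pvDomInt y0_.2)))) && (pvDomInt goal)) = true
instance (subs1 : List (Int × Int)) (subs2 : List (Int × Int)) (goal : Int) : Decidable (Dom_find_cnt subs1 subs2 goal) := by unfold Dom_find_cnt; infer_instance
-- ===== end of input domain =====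

-- B replaces A's scan over every integer in range(goal+1) by a single comprehension over subs1's items (simpler: one pass, one line).


-- ===== PORT A =====
def find_cnt (subs1 : List (Int × Int)) (subs2 : List (Int × Int)) (goal : Int) : Int :=
  (PySem.List.pyRange 0 (goal + 1) 1).foldl (fun cnt i =>
    match (PySem.Dict.mk subs1).get? i with
    | none => cnt
    | some v =>
      match (PySem.Dict.mk subs2).get? (goal - i) with
      | none => cnt
      | some w => cnt + v * w) 0

-- ===== PORT B =====
def find_cnt_alt (subs1 : List (Int × Int)) (subs2 : List (Int × Int)) (goal : Int) : Int :=
  (subs1.map (fun kv =>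
    if 0 ≤ kv.1 ∧ kv.1 ≤ goal ∧ (PySem.Dict.mk subs2).contains (goal - kv.1) then
      kv.2 * (PySem.Dict.mk subs2).getD (goal - kv.1) 0
    else 0)).sum

-- ===== PRECONDITION & SPEC =====
-- The Python arguments are dicts, modelled here as association lists; Pre_ excludes lists with
-- duplicate keys, which do not represent any Python dict (no dict input of A is excluded).
def Pre_find_cnt (subs1 : List (Int × Int)) (subs2 : List (Int × Int)) (goal : Int) : Prop :=
  (subs1.map Prod.fst).Nodup ∧ (subs2.map Prod.fst).Nodup
instance (subs1 : List (Int × Int)) (subs2 : List (Int × Int)) (goal : Int) : Decidable (Pre_find_cnt subs1 subs2 goal) := by unfold Pre_find_cnt; infer_instance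
def pvWitness_find_cnt : (List (Int × Int)) × (List (Int × Int)) × Int := ([(1, 2), (3, 1)], [(2, 5)], 3)

def Spec_find_cnt (subs1 : List (Int × Int)) (subs2 : List (Int × Int)) (goal : Int) (out : Int) : Prop := out = find_cnt_alt subs1 subs2 goal
instance (subs1 : List (Int × Int)) (subs2 : List (Int × Int)) (goal : Int) (out : Int) : Decidable (Spec_find_cnt subs1 subs2 goal out) := by unfold Spec_find_cnt; infer_instance

-- ===== CLAIM (what is proved, stated in full; the proofs are below) =====
def Claim_equal_find_cnt : Prop := ∀ (subs1 : List (Int × Int)) (subs2 : List (Int × Int)) (goal : Int), Dom_find_cnt subs1 subs2 goal → Pre_find_cnt subs1 subs2 goal → Spec_find_cnt subs1 subs2 goal (find_cnt subs1 subs2 goal)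

-- ===== LEMMAS AND PROOFS =====

-- the term A adds for index i (0 when either lookup misses)
def pvG (subs1 subs2 : List (Int × Int)) (goal i : Int) : Int :=
  match (PySem.Dict.mk subs1).get? i with
  | none => 0
  | some v =>
    match (PySem.Dict.mk subs2).get? (goal - i) with
    | none => 0
    | some w => v * w

lemma find_cnt_eq_sum (subs1 subs2 : List (Int × Int)) (goal : Int) :
    find_cnt subs1 subs2 goal = ((PySem.List.pyRange 0 (goal + 1) 1).map (pvG subs1 subs2 goal)).sum := by
  unfold find_cnt
  have hbody : (fun (cnt i : Int) =>
      match (PySem.Dict.mk subs1).get? i with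
      | none => cnt
      | some v =>
        match (PySem.Dict.mk subs2).get? (goal - i) with
        | none => cnt
        | some w => cnt + v * w) = fun cnt i => cnt + pvG subs1 subs2 goal i := by
    funext cnt i
    unfold pvG
    cases (PySem.Dict.mk subs1).get? i with
    | none => simp
    | some v => cases (PySem.Dict.mk subs2).get? (goal - i) with
      | none => simp
      | some w => simp
  rw [hbody, PySem.List.foldl_add]
  simp

lemma pvG_cons (subs2 : List (Int × Int)) (goal k v : Int) (rest : List (Int × Int)) (i : Int) :
    pvG ((k, v) :: rest) subs2 goal i =
      if k = i then
        (match (PySem.Dict.mk subs2).get? (goal - k) with | none => 0 | some w => v * w)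
      else pvG rest subs2 goal i := by
  unfold pvG
  rw [PySem.Dict.get?_mk_cons]
  by_cases h : k = i
  · subst h; simp
  · simp [h]

lemma pvG_not_mem (subs1 subs2 : List (Int × Int)) (goal i : Int)
    (h : i ∉ subs1.map Prod.fst) : pvG subs1 subs2 goal i = 0 := by
  unfold pvG
  have : (PySem.Dict.mk subs1).get? i = none := by
    rw [PySem.Dict.get?_eq_none_iff_not_mem_keys]
    simpa using h
  rw [this]

lemma sum_pvG_cons (subs2 : List (Int × Int)) (goal k v : Int) (rest : List (Int × Int))
    (hk : k ∉ rest.map Prod.fst) :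
    ∀ (R : List Int), R.Nodup →
      (R.map (pvG ((k, v) :: rest) subs2 goal)).sum =
        (if k ∈ R then
          (match (PySem.Dict.mk subs2).get? (goal - k) with | none => 0 | some w => v * w)
         else 0) + (R.map (pvG rest subs2 goal)).sum := by
  intro R
  induction R with
  | nil => intro _; simp
  | cons i R' ih =>
    intro hnd
    have hnd' : R'.Nodup := hnd.of_cons
    simp only [List.map_cons, List.sum_cons, ih hnd', pvG_cons]
    by_cases h : k = i
    · subst h
      have hkR' : k ∉ R' := (List.nodup_cons.mp hnd).1
      simp [hkR', pvG_not_mem rest subs2 goal k hk]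
      try ring
    · have : (k ∈ i :: R') ↔ (k ∈ R') := by simp [h]
      simp [h, this]
      split_ifs <;> ring

lemma sum_pvG_eq_alt (subs2 : List (Int × Int)) (goal : Int) :
    ∀ (subs1 : List (Int × Int)), (subs1.map Prod.fst).Nodup →
      ((PySem.List.pyRange 0 (goal + 1) 1).map (pvG subs1 subs2 goal)).sum =
        find_cnt_alt subs1 subs2 goal := by
  intro subs1
  induction subs1 with
  | nil =>
    intro _
    have h0 : (PySem.List.pyRange 0 (goal + 1) 1).map (pvG [] subs2 goal) =
        (PySem.List.pyRange 0 (goal + 1) 1).map (fun _ => (0 : Int)) :=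
      List.map_congr_left (fun i _ => pvG_not_mem [] subs2 goal i (by simp))
    simp [find_cnt_alt, h0]
  | cons kv rest ih =>
    intro hnd
    obtain ⟨k, v⟩ := kv
    have hpair := List.nodup_cons.mp hnd
    have hk : k ∉ rest.map Prod.fst := hpair.1
    have hnd' : (rest.map Prod.fst).Nodup := hpair.2
    rw [sum_pvG_cons subs2 goal k v rest hk _ (PySem.List.nodup_pyRange_one 0 (goal + 1)),
        ih hnd']
    have hmem : (k ∈ PySem.List.pyRange 0 (goal + 1) 1) ↔ (0 ≤ k ∧ k < goal + 1) :=
      PySem.List.mem_pyRange_one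
    have hterm :
        (if k ∈ PySem.List.pyRange 0 (goal + 1) 1 then
          (match (PySem.Dict.mk subs2).get? (goal - k) with | none => 0 | some w => v * w)
         else 0) =
        (if 0 ≤ k ∧ k ≤ goal ∧ (PySem.Dict.mk subs2).contains (goal - k) then
          v * (PySem.Dict.mk subs2).getD (goal - k) 0
         else 0) := by
      rw [if_congr hmem rfl rfl]
      by_cases hr : 0 ≤ k ∧ k < goal + 1
      · rw [if_pos hr]
        cases hg : (PySem.Dict.mk subs2).get? (goal - k) with
        | none =>
          have hc : (PySem.Dict.mk subs2).contains (goal - k) = false := by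
            rw [PySem.Dict.contains_eq_isSome_get?, hg]; rfl
          simp [hc]
        | some w =>
          have hc : (PySem.Dict.mk subs2).contains (goal - k) = true := by
            rw [PySem.Dict.contains_eq_isSome_get?, hg]; rfl
          have hd : (PySem.Dict.mk subs2).getD (goal - k) 0 = w := by
            simp [PySem.Dict.getD_eq_get?_getD, hg]
          rw [if_pos ⟨hr.1, by omega, hc⟩, hd]
      · rw [if_neg hr, if_neg (by intro h; exact hr ⟨h.1, by omega⟩)]
    rw [hterm]
    simp [find_cnt_alt]

-- ===== VERDICT (by name: the statement is the Claim_ definition above) =====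
theorem find_cnt_spec : Claim_equal_find_cnt := by
  intro subs1 subs2 goal _ hpre
  unfold Spec_find_cnt
  rw [find_cnt_eq_sum, sum_pvG_eq_alt subs2 goal subs1 hpre.1]
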